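-- pv_equiv track=rewrite | github.com/subrotonpi/clone_evaluation | data/gptcb_cross/gptcb_cross/None/1911.py | twoDuplicates
-- ===== SOURCE A (Python) =====
-- def twoDuplicates (values):
--   for i in range(len(values)):
--     counter = 0
--     for z in range(i + 1, len(values)):
--       if values[i] == values[z]:
--         counter += 1
--         if counter == 2:
--           return True
--   return False
-- ===== SOURCE B (Python) =====
-- def twoDuplicates(values):
--   counts = {}
--   for v in values:
--     c = counts.get(v, 0) + 1
--     if c == 3:
--       return True
--     counts[v] = c
--   return False
-- ===== Notes on version B (the rewrite author's own statement) =====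
-- stated objective: faster
-- what changed: Replaced the nested all-pairs index scan with a single pass that counts occurrences in a dictionary and returns True as soon as any count reaches 3.
import Mathlib
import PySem

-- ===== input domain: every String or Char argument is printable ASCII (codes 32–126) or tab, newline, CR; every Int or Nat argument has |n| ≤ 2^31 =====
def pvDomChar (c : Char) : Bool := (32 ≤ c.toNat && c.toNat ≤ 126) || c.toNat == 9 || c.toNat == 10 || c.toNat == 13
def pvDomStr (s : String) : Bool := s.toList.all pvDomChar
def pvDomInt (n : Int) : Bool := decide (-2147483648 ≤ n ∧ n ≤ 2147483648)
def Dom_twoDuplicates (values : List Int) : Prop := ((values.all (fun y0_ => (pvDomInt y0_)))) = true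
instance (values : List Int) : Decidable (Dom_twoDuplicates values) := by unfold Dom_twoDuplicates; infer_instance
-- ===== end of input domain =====

-- B replaces A's quadratic all-pairs index scan by a single counting pass over the list
-- (a dictionary of occurrence counts, returning True as soon as any count reaches 3).

-- ===== PORT A =====
-- inner 'for z in range(i+1, len(values))' loop: vi = values[i], counter as in A
def twoDupZ (values : List Int) (vi : Int) (zs : List Int) (counter : Int) : Bool :=
  match zs with
  | [] => false
  | z :: rest =>
    match PySem.List.pyGet? values z with
    | none => false  -- unreachable: z is always a valid index
    | some vz =>
      if vi = vz then
        if counter + 1 = 2 then true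
        else twoDupZ values vi rest (counter + 1)
      else twoDupZ values vi rest counter

-- outer 'for i in range(len(values))' loop
def twoDupI (values : List Int) (is_ : List Int) : Bool :=
  match is_ with
  | [] => false
  | i :: rest =>
    match PySem.List.pyGet? values i with
    | none => false  -- unreachable: i is always a valid index
    | some vi =>
      if twoDupZ values vi (PySem.List.pyRange (i + 1) (values.length : Int) 1) 0 then true
      else twoDupI values rest

def twoDuplicates (values : List Int) : Bool :=
  twoDupI values (PySem.List.pyRange 0 (values.length : Int) 1)

-- ===== PORT B =====
-- single pass with a dictionary of counts; early return when a count reaches 3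
def twoDupCountLoop (vs : List Int) (counts : PySem.Dict Int Int) : Bool :=
  match vs with
  | [] => false
  | v :: rest =>
    let c := counts.getD v 0 + 1
    if c = 3 then true
    else twoDupCountLoop rest (counts.insert v c)

def twoDuplicates_alt (values : List Int) : Bool :=
  twoDupCountLoop values PySem.Dict.empty

-- ===== PRECONDITION & SPEC =====
def Spec_twoDuplicates (values : List Int) (out : Bool) : Prop := out = twoDuplicates_alt values
instance (values : List Int) (out : Bool) : Decidable (Spec_twoDuplicates values out) := by unfold Spec_twoDuplicates; infer_instance

-- ===== CLAIM (what is proved, stated in full; the proofs are below) =====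
def Claim_equal_twoDuplicates : Prop := ∀ (values : List Int), Dom_twoDuplicates values → Spec_twoDuplicates values (twoDuplicates values)

-- ===== LEMMAS AND PROOFS =====

-- A's inner loop over range(j, len) counts occurrences of vi in the suffix drop j.
theorem twoDupZ_char (values : List Int) (vi : Int) :
    ∀ (k j : Nat) (c : Int), j + k = values.length → 0 ≤ c → c ≤ 1 →
    (twoDupZ values vi (PySem.List.pyRange (j : Int) (values.length : Int) 1) c = true ↔
      (2 : Int) ≤ c + ((values.drop j).count vi : Int)) := by
  intro k
  induction k with
  | zero =>
    intro j c hj hc0 hc1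
    rw [PySem.List.pyRange_one_eq_nil (by omega)]
    simp [twoDupZ, List.drop_of_length_le (by omega : values.length ≤ j)]
    omega
  | succ k ih =>
    intro j c hj hc0 hc1
    have hjlt : j < values.length := by omega
    rw [PySem.List.pyRange_one_cons (by exact_mod_cast hjlt)]
    have hdrop : values.drop j = values[j] :: values.drop (j + 1) :=
      List.drop_eq_getElem_cons hjlt
    have hcnt : (values.drop j).count vi
        = (values.drop (j + 1)).count vi + (if values[j] = vi then 1 else 0) := by
      rw [hdrop]; simp only [List.count_cons, beq_iff_eq]
    simp only [twoDupZ, PySem.List.pyGet?_natCast, List.getElem?_eq_getElem hjlt]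
    have hcast : ((j : Int) + 1) = ((j + 1 : Nat) : Int) := by push_cast; ring
    rw [hcast]
    by_cases hv : vi = values[j]
    · rw [if_pos hv.symm] at hcnt
      rw [if_pos hv]
      by_cases hc : c + 1 = 2
      · rw [if_pos hc]
        simp only [true_iff]
        omega
      · rw [if_neg hc, ih (j + 1) (c + 1) (by omega) (by omega) (by omega)]
        omega
    · rw [if_neg (fun h => hv h.symm)] at hcnt
      rw [if_neg hv, ih (j + 1) c (by omega) hc0 hc1]
      omega

-- A's outer loop: some index i ≥ j has two later copies of values[i].
theorem twoDupI_char (values : List Int) :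
    ∀ (k j : Nat), j + k = values.length →
    (twoDupI values (PySem.List.pyRange (j : Int) (values.length : Int) 1) = true ↔
      ∃ i, j ≤ i ∧ i < values.length ∧ 2 ≤ (values.drop (i + 1)).count (values.getD i 0)) := by
  intro k
  induction k with
  | zero =>
    intro j hj
    rw [PySem.List.pyRange_one_eq_nil (by omega)]
    simp [twoDupI]
    omega
  | succ k ih =>
    intro j hj
    have hjlt : j < values.length := by omega
    rw [PySem.List.pyRange_one_cons (by exact_mod_cast hjlt)]
    simp only [twoDupI, PySem.List.pyGet?_natCast, List.getElem?_eq_getElem hjlt]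
    have hcast : ((j : Int) + 1) = ((j + 1 : Nat) : Int) := by push_cast; ring
    rw [hcast]
    have hz := twoDupZ_char values values[j] k (j + 1) 0 (by omega) (by omega) (by omega)
    by_cases hq : twoDupZ values values[j] (PySem.List.pyRange ((j + 1 : Nat) : Int) (values.length : Int) 1) 0 = true
    · simp only [hq, if_true]
      constructor
      · intro _
        refine ⟨j, le_refl j, hjlt, ?_⟩
        have := hz.mp hq
        rw [List.getD_eq_getElem values 0 hjlt]
        omega
      · intro _; trivial
    · rw [if_neg hq, ih (j + 1) (by omega)]
      constructor
      · rintro ⟨i, h1, h2, h3⟩; exact ⟨i, by omega, h2, h3⟩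
      · rintro ⟨i, h1, h2, h3⟩
        refine ⟨i, ?_, h2, h3⟩
        rcases Nat.eq_or_lt_of_le h1 with heq | hlt
        · exfalso
          apply hq
          rw [hz]
          rw [← heq] at h3
          rw [List.getD_eq_getElem values 0 hjlt] at h3
          omega
        · omega

-- if some element occurs ≥ 3 times, some position has ≥ 2 later copies
theorem exists_pos_of_count (values : List Int) (v : Int) (h : 3 ≤ values.count v) :
    ∃ i, i < values.length ∧ 2 ≤ (values.drop (i + 1)).count (values.getD i 0) := by
  induction values with
  | nil => simp at h
  | cons x rest ih =>
    by_cases hx : x = v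
    · subst hx
      refine ⟨0, by simp, ?_⟩
      rw [List.count_cons_self] at h
      simpa using (by omega : 2 ≤ rest.count x)
    · have hr : 3 ≤ rest.count v := by
        simp [hx] at h; omega
      obtain ⟨i, hi, hc⟩ := ih hr
      exact ⟨i + 1, by simpa using Nat.succ_lt_succ hi, by simpa using hc⟩

-- a position with ≥ 2 later copies yields total count ≥ 3
theorem count_of_pos (values : List Int) (i : Nat) (hi : i < values.length)
    (h : 2 ≤ (values.drop (i + 1)).count (values.getD i 0)) :
    3 ≤ values.count (values.getD i 0) := by
  induction values generalizing i with
  | nil => simp at hi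
  | cons x rest ih =>
    cases i with
    | zero =>
      simp only [List.getD_cons_zero, List.drop_succ_cons, List.drop_zero] at h
      simp only [List.getD_cons_zero, List.count_cons_self]
      omega
    | succ i =>
      have hi' : i < rest.length := by simpa using hi
      have h' : 2 ≤ (rest.drop (i + 1)).count (rest.getD i 0) := by simpa using h
      have := ih i hi' h'
      simp only [List.getD_cons_succ, List.count_cons]
      omega

-- A returns true iff some value occurs at least three times
theorem twoDuplicates_iff (values : List Int) :
    twoDuplicates values = true ↔ ∃ v, 3 ≤ values.count v := by
  unfold twoDuplicates
  rw [show (0 : Int) = ((0 : Nat) : Int) from rfl,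
    twoDupI_char values values.length 0 (by omega)]
  constructor
  · rintro ⟨i, _, hi, hc⟩
    exact ⟨values.getD i 0, count_of_pos values i hi hc⟩
  · rintro ⟨v, hv⟩
    obtain ⟨i, hi, hc⟩ := exists_pos_of_count values v hv
    exact ⟨i, Nat.zero_le i, hi, hc⟩

-- B's loop invariant: the dictionary holds the counts of the processed prefix p, all < 3.
theorem twoDupCountLoop_char :
    ∀ (vs p : List Int) (counts : PySem.Dict Int Int),
    (∀ v, counts.getD v 0 = (p.count v : Int)) → (∀ v, p.count v ≤ 2) →
    (twoDupCountLoop vs counts = true ↔ ∃ v, 3 ≤ (p ++ vs).count v) := by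
  intro vs
  induction vs with
  | nil =>
    intro p counts _ hle
    simp [twoDupCountLoop]
    intro v
    have := hle v
    omega
  | cons x rest ih =>
    intro p counts hcnt hle
    simp only [twoDupCountLoop]
    by_cases h3 : counts.getD x 0 + 1 = 3
    · simp only [if_pos h3]
      have hx : p.count x = 2 := by have := hcnt x; omega
      constructor
      · intro _
        refine ⟨x, ?_⟩
        rw [List.count_append, List.count_cons_self, hx]
        omega
      · intro _; trivial
    · rw [if_neg h3]
      have hx2 : p.count x ≤ 1 := by have := hcnt x; have := hle x; omega
      have h1 : ∀ v, (counts.insert x (counts.getD x 0 + 1)).getD v 0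
          = ((p ++ [x]).count v : Int) := by
        intro v
        rw [PySem.Dict.getD_insert]
        by_cases hvx : v = x
        · subst hvx
          rw [if_pos rfl, hcnt v]
          simp [List.count_append]
        · have hxv : ¬ x = v := fun h => hvx h.symm
          rw [if_neg hvx, hcnt v]
          simp [List.count_append, hxv]
      have h2 : ∀ v, (p ++ [x]).count v ≤ 2 := by
        intro v
        by_cases hvx : v = x
        · subst hvx
          simp [List.count_append]
          omega
        · have hxv : ¬ x = v := fun h => hvx h.symm
          simp [List.count_append, hxv]
          exact hle v
      rw [ih (p ++ [x]) _ h1 h2]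
      constructor <;> rintro ⟨v, hv⟩ <;> refine ⟨v, ?_⟩ <;>
        simpa [List.count_append, List.count_cons] using hv

theorem twoDuplicates_alt_iff (values : List Int) :
    twoDuplicates_alt values = true ↔ ∃ v, 3 ≤ values.count v := by
  unfold twoDuplicates_alt
  rw [twoDupCountLoop_char values [] PySem.Dict.empty (by simp) (by simp)]
  simp

-- ===== VERDICT (by name: the statement is the Claim_ definition above) =====
theorem twoDuplicates_spec : Claim_equal_twoDuplicates := by
  intro values _
  unfold Spec_twoDuplicates
  rw [Bool.eq_iff_iff, twoDuplicates_iff, twoDuplicates_alt_iff]
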